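-- pv_equiv track=rewrite | github.com/amanalehegne/A2SV_PROGRAMMING | 1346-check-if-n-and-its-double-exist/1346-check-if-n-and-its-double-exist.py | checkIfExist
-- ===== SOURCE A (Python) =====
-- from typing import List
--
-- def checkIfExist(arr: List[int]) -> bool:
--     # [-2,0,10,-19,4,6,-8]
--     numbers = dict()
--     for i, num in enumerate(arr):
--         numbers[num] = i + 1
--
--     for i, num in enumerate(arr):
--         if numbers.get(num * 2) and numbers.get(num * 2) != i + 1:
--             return True
--
--     return False
-- ===== SOURCE B (Python) =====
-- from typing import List
--
-- def checkIfExist(arr: List[int]) -> bool: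
--     seen = set()
--     for num in arr:
--         if 2 * num in seen or (num % 2 == 0 and num // 2 in seen):
--             return True
--         seen.add(num)
--     return False
-- ===== Notes on version B (the rewrite author's own statement) =====
-- stated objective: idiomatic
-- what changed: Replaced the two-pass build-full-last-index-dict-then-rescan with a single pass keeping a set of values seen so far, testing the double and (guarded by num % 2 == 0) the half direction and returning on the first hit.
import Mathlib
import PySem

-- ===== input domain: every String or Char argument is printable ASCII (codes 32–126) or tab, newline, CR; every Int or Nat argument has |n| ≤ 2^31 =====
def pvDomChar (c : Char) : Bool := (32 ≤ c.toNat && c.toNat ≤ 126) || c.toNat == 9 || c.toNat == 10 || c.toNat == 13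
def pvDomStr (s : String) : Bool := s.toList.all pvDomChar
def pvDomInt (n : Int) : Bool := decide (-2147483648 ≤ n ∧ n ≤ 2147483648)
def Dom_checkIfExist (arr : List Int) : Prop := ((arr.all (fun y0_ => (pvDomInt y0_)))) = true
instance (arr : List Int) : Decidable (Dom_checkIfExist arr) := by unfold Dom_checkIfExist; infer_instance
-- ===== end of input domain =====

-- B replaces A's two passes (build a value→last-index dict, then rescan it for each element's double)
-- by a single pass keeping a set of previously seen values and testing the double and the guarded half.

-- ===== PORT A =====
def checkIfExist (arr : List Int) : Bool :=
  let numbers : PySem.Dict Int Int :=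
    (PySem.List.enumerate arr).foldl (fun d p => d.insert p.2 (p.1 + 1)) PySem.Dict.empty
  (PySem.List.enumerate arr).any (fun p =>
    (match numbers.get? (p.2 * 2) with
     | none => false
     | some v => v != 0) &&
    (numbers.get? (p.2 * 2) != some (p.1 + 1)))

-- ===== PORT B =====
def checkGo (seen : PySem.Set Int) : List Int → Bool
  | [] => false
  | num :: rest =>
    if PySem.Set.contains seen (2 * num) ||
       (PySem.Int.mod num 2 == 0 && PySem.Set.contains seen (PySem.Int.floordiv num 2))
    then true
    else checkGo (PySem.Set.add seen num) rest

def checkIfExist_alt (arr : List Int) : Bool := checkGo PySem.Set.empty arr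

-- ===== PRECONDITION & SPEC =====
def Spec_checkIfExist (arr : List Int) (out : Bool) : Prop := out = checkIfExist_alt arr
instance (arr : List Int) (out : Bool) : Decidable (Spec_checkIfExist arr out) := by unfold Spec_checkIfExist; infer_instance

-- ===== CLAIM (what is proved, stated in full; the proofs are below) =====
def Claim_equal_checkIfExist : Prop := ∀ (arr : List Int), Dom_checkIfExist arr → Spec_checkIfExist arr (checkIfExist arr)

-- ===== LEMMAS AND PROOFS =====

-- last-occurrence index helper: lidxAux k b arr = some (b + j + 1) for the largest j with arr[j] = k
def lidxAux (k b : Int) : List Int → Option Int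
  | [] => none
  | y :: t =>
    match lidxAux k (b + 1) t with
    | some v => some v
    | none => if y = k then some (b + 1) else none

-- the common characterisation: some nonzero element has its double in arr, or arr holds two zeros
def PairSpec (arr : List Int) : Prop :=
  (∃ x ∈ arr, x ≠ 0 ∧ 2 * x ∈ arr) ∨ 2 ≤ arr.count 0

-- "some earlier element is the double or the half of a later one", structurally along the list
def pairP : List Int → Prop
  | [] => False
  | x :: t => (∃ y ∈ t, y = 2 * x ∨ x = 2 * y) ∨ pairP t


lemma lidxAux_append (k : Int) (l : List Int) (x : Int) : ∀ b : Int,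
    lidxAux k b (l ++ [x]) = if x = k then some (b + l.length + 1) else lidxAux k b l := by
  induction l with
  | nil => intro b; simp [lidxAux]
  | cons y t ih =>
    intro b
    simp only [List.cons_append, lidxAux, ih (b + 1)]
    split_ifs with h <;> simp [List.length_cons] <;> ring

lemma lidxAux_some (k : Int) : ∀ (arr : List Int) (b v : Int), lidxAux k b arr = some v →
    ∃ j : Nat, ∃ hj : j < arr.length, arr[j] = k ∧ v = b + j + 1 := by
  intro arr
  induction arr with
  | nil => intro b v h; simp [lidxAux] at h
  | cons y t ih =>
    intro b v h
    simp only [lidxAux] at h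
    cases hr : lidxAux k (b + 1) t with
    | some w =>
      rw [hr] at h
      simp at h
      obtain ⟨j, hj, hk, hv⟩ := ih (b + 1) w hr
      exact ⟨j + 1, by simpa using hj, by simpa using hk, by omega⟩
    | none =>
      rw [hr] at h
      split_ifs at h with hy
      · simp at h
        exact ⟨0, by simp, by simpa using hy, by omega⟩

lemma lidxAux_ge (k : Int) : ∀ (arr : List Int) (j : Nat) (hj : j < arr.length), arr[j] = k →
    ∀ b : Int, ∃ v, lidxAux k b arr = some v ∧ b + j + 1 ≤ v := by
  intro arr
  induction arr with
  | nil => intro j hj; simp at hj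
  | cons y t ih =>
    intro j hj hk b
    cases hr : lidxAux k (b + 1) t with
    | some w =>
      refine ⟨w, by simp [lidxAux, hr], ?_⟩
      obtain ⟨j', hj', hk', hv⟩ := lidxAux_some k t (b + 1) w hr
      cases j with
      | zero => omega
      | succ j =>
        obtain ⟨v', hv', hge⟩ := ih j (by simpa using hj) (by simpa using hk) (b + 1)
        rw [hr] at hv'
        simp at hv'
        omega
    | none =>
      cases j with
      | zero =>
        simp at hk
        exact ⟨b + 1, by simp [lidxAux, hr, hk], by omega⟩
      | succ j =>
        obtain ⟨v', hv', _⟩ := ih j (by simpa using hj) (by simpa using hk) (b + 1)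
        rw [hr] at hv'
        simp at hv'

lemma two_zeros_count : ∀ (arr : List Int) (i j : Nat), ∀ (hi : i < arr.length) (hj : j < arr.length),
    i ≠ j → arr[i] = 0 → arr[j] = 0 → 2 ≤ arr.count 0 := by
  intro arr
  induction arr with
  | nil => intro i j hi; simp at hi
  | cons y t ih =>
    intro i j hi hj hne h0i h0j
    rw [List.count_cons]
    cases i with
    | zero =>
      simp only [List.getElem_cons_zero] at h0i
      cases j with
      | zero => omega
      | succ j =>
        simp only [List.getElem_cons_succ] at h0j
        have hm : (0 : Int) ∈ t := h0j ▸ List.getElem_mem _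
        have := List.count_pos_iff.mpr hm
        simp [h0i]
        omega
    | succ i =>
      simp only [List.getElem_cons_succ] at h0i
      cases j with
      | zero =>
        simp only [List.getElem_cons_zero] at h0j
        have hm : (0 : Int) ∈ t := h0i ▸ List.getElem_mem _
        have := List.count_pos_iff.mpr hm
        simp [h0j]
        omega
      | succ j =>
        simp only [List.getElem_cons_succ] at h0j
        have := ih i j (by simpa using hi) (by simpa using hj) (by omega) h0i h0j
        omega

lemma count_two_zeros : ∀ (arr : List Int), 2 ≤ arr.count 0 →
    ∃ i j : Nat, ∃ hi : i < arr.length, ∃ hj : j < arr.length,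
      i < j ∧ arr[i] = 0 ∧ arr[j] = 0 := by
  intro arr
  induction arr with
  | nil => intro h; simp at h
  | cons y t ih =>
    intro h
    rw [List.count_cons] at h
    by_cases hy : y = (0 : Int)
    · simp only [hy, beq_self_eq_true, if_true] at h
      have hm : (0 : Int) ∈ t := List.count_pos_iff.mp (by omega)
      obtain ⟨j, hj, hj0⟩ := List.mem_iff_getElem.mp hm
      exact ⟨0, j + 1, by simp, by simpa using hj, by omega, by simpa using hy,
        by simpa using hj0⟩
    · have h' : 2 ≤ List.count 0 t := by simp [hy] at h; omega
      obtain ⟨i, j, hi, hj, hij, h0i, h0j⟩ := ih h'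
      exact ⟨i + 1, j + 1, by simpa using hi, by simpa using hj, by omega,
        by simpa using h0i, by simpa using h0j⟩

lemma dict_get?_eq_lidxAux (arr : List Int) (k : Int) :
    ((PySem.List.enumerate arr).foldl (fun d p => d.insert p.2 (p.1 + 1))
      (PySem.Dict.empty : PySem.Dict Int Int)).get? k = lidxAux k 0 arr := by
  induction arr using List.reverseRecOn with
  | nil => simp [lidxAux, PySem.List.enumerate]
  | append_singleton l x ih =>
    rw [PySem.List.enumerate_append, List.foldl_append, lidxAux_append]
    simp only [PySem.List.enumerate, List.foldl_cons, List.foldl_nil, PySem.Dict.get?_insert, ih]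
    rcases eq_or_ne k x with rfl | h
    · simp
    · rw [if_neg h, if_neg (Ne.symm h)]

lemma checkIfExist_iff (arr : List Int) : checkIfExist arr = true ↔ PairSpec arr := by
  unfold checkIfExist
  simp only [List.any_eq_true, PySem.List.mem_enumerate_iff, dict_get?_eq_lidxAux]
  constructor
  · rintro ⟨p, ⟨i, hi, rfl⟩, hcond⟩
    simp only [Bool.and_eq_true, bne_iff_ne, ne_eq] at hcond
    obtain ⟨h1, h2⟩ := hcond
    cases hg : lidxAux (arr[i] * 2) 0 arr with
    | none => rw [hg] at h1; simp at h1
    | some v =>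
      rw [hg] at h2
      obtain ⟨j, hj, hk, hv⟩ := lidxAux_some _ _ _ _ hg
      by_cases hz : arr[i] = 0
      · refine Or.inr (two_zeros_count arr i j hi hj ?_ hz (by rw [hk, hz]; ring))
        intro hij
        subst hij
        exact h2 (by simp; omega)
      · exact Or.inl ⟨arr[i], List.getElem_mem _, hz, by
          have : arr[j] = 2 * arr[i] := by rw [hk]; ring
          exact this ▸ List.getElem_mem _⟩
  · rintro (⟨x, hx, hxz, h2x⟩ | hcnt)
    · obtain ⟨i, hi, rfl⟩ := List.mem_iff_getElem.mp hx
      obtain ⟨j, hj, hjv⟩ := List.mem_iff_getElem.mp h2x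
      obtain ⟨v, hv, hge⟩ := lidxAux_ge (arr[i] * 2) arr j hj (by rw [hjv]; ring) 0
      obtain ⟨j', hj', hk', hv'⟩ := lidxAux_some _ _ _ _ hv
      refine ⟨(0 + (i : Int), arr[i]), ⟨i, hi, rfl⟩, ?_⟩
      simp only [hv, Bool.and_eq_true, bne_iff_ne, ne_eq, Option.some.injEq]
      refine ⟨by omega, ?_⟩
      intro hvi
      have hji : j' = i := by omega
      subst hji
      apply hxz
      omega
    · obtain ⟨i, j, hi, hj, hij, h0i, h0j⟩ := count_two_zeros arr hcnt
      obtain ⟨v, hv, hge⟩ := lidxAux_ge (arr[i] * 2) arr j hj (by rw [h0j, h0i]; ring) 0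
      refine ⟨(0 + (i : Int), arr[i]), ⟨i, hi, rfl⟩, ?_⟩
      simp only [hv, Bool.and_eq_true, bne_iff_ne, ne_eq, Option.some.injEq]
      obtain ⟨j', hj', hk', hv'⟩ := lidxAux_some _ _ _ _ hv
      exact ⟨by omega, by intro h; omega⟩

lemma half_check (x y : Int) :
    (PySem.Int.mod x 2 == 0 && decide (PySem.Int.floordiv x 2 = y)) = true ↔ x = 2 * y := by
  rw [Bool.and_eq_true, beq_iff_eq, decide_eq_true_iff]
  constructor
  · rintro ⟨hm, hd⟩
    obtain ⟨c, rfl⟩ := (PySem.Int.mod_eq_zero_iff_dvd x 2).mp hm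
    rw [PySem.Int.floordiv_eq_ediv_of_pos (by norm_num)] at hd
    omega
  · rintro rfl
    rw [PySem.Int.floordiv_eq_ediv_of_pos (by norm_num)]
    exact ⟨(PySem.Int.mod_eq_zero_iff_dvd _ 2).mpr ⟨y, rfl⟩, by omega⟩

lemma checkGo_iff (l : List Int) : ∀ (seen : PySem.Set Int),
    checkGo seen l = true ↔
      (∃ x ∈ l, ∃ y ∈ seen, y = 2 * x ∨ x = 2 * y) ∨ pairP l := by
  induction l with
  | nil => intro seen; simp [checkGo, pairP]
  | cons x t ih =>
    intro seen
    simp only [checkGo, pairP]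
    split_ifs with hc
    · simp only [true_iff]
      rw [Bool.or_eq_true, PySem.Set.contains_iff, Bool.and_eq_true] at hc
      rcases hc with h2 | ⟨hm, hh⟩
      · exact Or.inl ⟨x, List.mem_cons_self, 2 * x, h2, Or.inl rfl⟩
      · rw [PySem.Set.contains_iff] at hh
        refine Or.inl ⟨x, List.mem_cons_self, PySem.Int.floordiv x 2, hh, Or.inr ?_⟩
        exact (half_check x (PySem.Int.floordiv x 2)).mp
          (by rw [Bool.and_eq_true]; exact ⟨hm, by simp⟩)
    · rw [ih]
      rw [Bool.or_eq_true, PySem.Set.contains_iff, Bool.and_eq_true, PySem.Set.contains_iff] at hc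
      push_neg at hc
      constructor
      · rintro (⟨z, hz, y, hy, hrel⟩ | hp)
        · rw [PySem.Set.mem_add] at hy
          rcases hy with hy | rfl
          · exact Or.inl ⟨z, List.mem_cons_of_mem _ hz, y, hy, hrel⟩
          · exact Or.inr (Or.inl ⟨z, hz, by tauto⟩)
        · exact Or.inr (Or.inr hp)
      · rintro (⟨z, hz, y, hy, hrel⟩ | ⟨y, hy, hrel⟩ | hp)
        · rcases List.mem_cons.mp hz with hzx | hz'
          · subst hzx
            rcases hrel with h1 | h1
            · exact absurd (h1 ▸ hy) hc.1
            · exfalso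
              have hb := (half_check z y).mpr h1
              rw [Bool.and_eq_true, beq_iff_eq, decide_eq_true_iff] at hb
              exact (hc.2 (by rw [beq_iff_eq]; exact hb.1)) (by rw [hb.2]; exact hy)
          · exact Or.inl ⟨z, hz', y, (PySem.Set.mem_add _ _ _).mpr (Or.inl hy), hrel⟩
        · exact Or.inl ⟨y, hy, x, (PySem.Set.mem_add _ _ _).mpr (Or.inr rfl), by tauto⟩
        · exact Or.inr hp

lemma pairP_iff : ∀ (arr : List Int), pairP arr ↔ PairSpec arr := by
  intro arr
  induction arr with
  | nil => simp [pairP, PairSpec]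
  | cons x t ih =>
    simp only [pairP]
    rw [ih]
    unfold PairSpec
    constructor
    · rintro (⟨y, hy, hrel | hrel⟩ | ⟨z, hz, hz0, h2z⟩ | hcnt)
      · by_cases hx : x = (0 : Int)
        · subst hx
          have hy0 : y = (0 : Int) := by omega
          have hpos := List.count_pos_iff.mpr (hy0 ▸ hy)
          refine Or.inr ?_
          rw [List.count_cons]
          simp only [BEq.rfl, ↓reduceIte]
          omega
        · exact Or.inl ⟨x, List.mem_cons_self, hx, hrel ▸ List.mem_cons_of_mem _ hy⟩
      · by_cases hy0 : y = (0 : Int)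
        · have hx0 : x = (0 : Int) := by omega
          subst hx0
          have hpos := List.count_pos_iff.mpr (hy0 ▸ hy)
          refine Or.inr ?_
          rw [List.count_cons]
          simp only [BEq.rfl, ↓reduceIte]
          omega
        · exact Or.inl ⟨y, List.mem_cons_of_mem _ hy, hy0, hrel ▸ List.mem_cons_self⟩
      · exact Or.inl ⟨z, List.mem_cons_of_mem _ hz, hz0, List.mem_cons_of_mem _ h2z⟩
      · refine Or.inr ?_
        rw [List.count_cons]
        omega
    · rintro (⟨z, hz, hz0, h2z⟩ | hcnt)
      · rcases List.mem_cons.mp hz with rfl | hz'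
        · rcases List.mem_cons.mp h2z with heq | h2z'
          · exact absurd (by omega : z = 0) hz0
          · exact Or.inl ⟨2 * z, h2z', Or.inl rfl⟩
        · rcases List.mem_cons.mp h2z with heq | h2z'
          · exact Or.inl ⟨z, hz', Or.inr heq.symm⟩
          · exact Or.inr (Or.inl ⟨z, hz', hz0, h2z'⟩)
      · by_cases hx : x = (0 : Int)
        · subst hx
          rw [List.count_cons] at hcnt
          simp only [BEq.rfl, ↓reduceIte] at hcnt
          have hm : (0 : Int) ∈ t := List.count_pos_iff.mp (by omega)
          exact Or.inl ⟨0, hm, by norm_num⟩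
        · rw [List.count_cons] at hcnt
          simp [hx] at hcnt
          exact Or.inr (Or.inr hcnt)

-- ===== VERDICT (by name: the statement is the Claim_ definition above) =====
theorem checkIfExist_spec : Claim_equal_checkIfExist := by
  intro arr _
  unfold Spec_checkIfExist
  have hA := checkIfExist_iff arr
  have hB : checkIfExist_alt arr = true ↔ PairSpec arr := by
    rw [checkIfExist_alt, checkGo_iff, ← pairP_iff]
    simp [PySem.Set.empty]
  cases h1 : checkIfExist arr <;> cases h2 : checkIfExist_alt arr <;> simp_all
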